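-- pv_equiv track=rewrite | github.com/nextX-AG/roombankerRestAPIWeb | utils/template_learning.py | _determine_message_type
-- ===== SOURCE A (Python) =====
-- from typing import Dict, List, Any, Optional, Tuple
--
-- def _determine_message_type(common_fields: Dict[str, Any], sample_message: Dict[str, Any]) -> str:
--     """
--     Bestimmt den Nachrichtentyp basierend auf Feldern
--     """
--     # Einfache Heuristik für Nachrichtentypen
--     if any('alarm' in field.lower() for field in common_fields.keys()):
--         if any('panic' in str(sample_message).lower() for field in common_fields.keys()):
--             return 'Panic Alarm'
--         return 'Alarm'
--     elif any('temperature' in field.lower() or 'humidity' in field.lower() for field in common_fields.keys()):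
--         return 'Sensor Status'
--     elif any('battery' in field.lower() for field in common_fields.keys()):
--         return 'Battery Status'
--     elif any('gateway' in field.lower() for field in common_fields.keys()):
--         return 'Gateway Status'
--     else:
--         return 'Status Update'
-- ===== SOURCE B (Python) =====
-- _LABELS = ('Alarm', 'Sensor Status', 'Battery Status', 'Gateway Status', 'Status Update')
--
-- def _rank(field):
--     """Classify a single field name into a priority rank (0 = highest)."""
--     f = field.lower()
--     if 'alarm' in f:
--         return 0
--     if 'temperature' in f or 'humidity' in f:
--         return 1
--     if 'battery' in f:
--         return 2
--     if 'gateway' in f: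
--         return 3
--     return 4
--
-- def _determine_message_type(common_fields, sample_message):
--     """Rank each key once, take the best (minimum) rank, look the label up in a table."""
--     best = min((_rank(k) for k in common_fields.keys()), default=4)
--     if best == 0 and 'panic' in str(sample_message).lower():
--         return 'Panic Alarm'
--     return _LABELS[best]
-- ===== Notes on version B (the rewrite author's own statement) =====
-- stated objective: alternative
-- what changed: Replaces A's five prioritized any()-scans of the key set (one per category, plus a vacuous per-key re-check of the constant panic test) by the transposed computation: each key is classified once into a numeric priority rank, the ranks are min-reduced, and the answer is a table lookup by the best rank with a single standalone panic check.
import Mathlib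
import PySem

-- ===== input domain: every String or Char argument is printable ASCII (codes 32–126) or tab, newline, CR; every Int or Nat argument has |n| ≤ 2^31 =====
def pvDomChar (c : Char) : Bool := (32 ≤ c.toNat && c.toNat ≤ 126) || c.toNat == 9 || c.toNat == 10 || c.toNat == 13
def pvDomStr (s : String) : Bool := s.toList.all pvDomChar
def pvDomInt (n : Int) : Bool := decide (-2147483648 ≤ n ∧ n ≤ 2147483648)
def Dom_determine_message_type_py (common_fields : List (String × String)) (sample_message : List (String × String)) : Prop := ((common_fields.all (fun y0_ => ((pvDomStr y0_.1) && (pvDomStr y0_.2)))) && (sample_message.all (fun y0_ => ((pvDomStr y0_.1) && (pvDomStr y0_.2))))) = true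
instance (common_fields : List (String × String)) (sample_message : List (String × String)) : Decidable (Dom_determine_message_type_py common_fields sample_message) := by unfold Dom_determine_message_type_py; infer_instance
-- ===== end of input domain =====

-- B transposes A's per-category any()-scans: each key is ranked once, the ranks are
-- min-reduced and the label is a table lookup (objective: alternative decomposition, same cost).


-- ===== PORT A =====
-- Hand-written port of Python's repr(s) for str, exact on the Dom's character set
-- (printable ASCII plus tab/newline/CR): delimiter is ' unless s contains ' and no ",
-- and \\ \' \" \t \n \r are the only escapes such strings need.
def pyReprChars (cs : List Char) : List Char :=
  let q : Char := if cs.contains '\'' && !cs.contains '"' then '"' else '\''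
  q :: (cs.flatMap (fun c =>
    if c = '\\' then ['\\', '\\']
    else if c = q then ['\\', q]
    else if c = '\t' then ['\\', 't']
    else if c = '\n' then ['\\', 'n']
    else if c = '\r' then ['\\', 'r']
    else [c])) ++ [q]

-- Hand-written port of Python's str(d) for a dict of strings (exact for the
-- duplicate-free association lists a Python dict denotes):
-- '{' + ', '.join(repr(k) + ': ' + repr(v)) + '}'.
def pyStrDict (d : List (String × String)) : String :=
  String.ofList ('{' :: (PySem.Chars.join [',', ' ']
    (d.map (fun kv => pyReprChars kv.1.toList ++ ':' :: ' ' :: pyReprChars kv.2.toList)) ++ ['}']))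

def determine_message_type_py (common_fields : List (String × String)) (sample_message : List (String × String)) : String :=
  if common_fields.any (fun field => PySem.Str.isIn "alarm" (PySem.Str.lower field.1)) then
    if common_fields.any (fun _field => PySem.Str.isIn "panic" (PySem.Str.lower (pyStrDict sample_message))) then
      "Panic Alarm"
    else
      "Alarm"
  else if common_fields.any (fun field => PySem.Str.isIn "temperature" (PySem.Str.lower field.1) || PySem.Str.isIn "humidity" (PySem.Str.lower field.1)) then
    "Sensor Status"
  else if common_fields.any (fun field => PySem.Str.isIn "battery" (PySem.Str.lower field.1)) then
    "Battery Status"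
  else if common_fields.any (fun field => PySem.Str.isIn "gateway" (PySem.Str.lower field.1)) then
    "Gateway Status"
  else
    "Status Update"

-- ===== PORT B =====
def pvLabels : List String := ["Alarm", "Sensor Status", "Battery Status", "Gateway Status", "Status Update"]

-- port of Source B's _rank: classify one field name into a priority rank (0 = highest)
def pvRank (field : String) : Nat :=
  let f := PySem.Str.lower field
  if PySem.Str.isIn "alarm" f then 0
  else if PySem.Str.isIn "temperature" f || PySem.Str.isIn "humidity" f then 1
  else if PySem.Str.isIn "battery" f then 2
  else if PySem.Str.isIn "gateway" f then 3
  else 4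

-- min(ranks, default=4): every rank is ≤ 4, so folding min from 4 is exact.
def determine_message_type_py_alt (common_fields : List (String × String)) (sample_message : List (String × String)) : String :=
  let best := (common_fields.map (fun kv => pvRank kv.1)).foldr Nat.min 4
  if best == 0 && PySem.Str.isIn "panic" (PySem.Str.lower (pyStrDict sample_message)) then
    "Panic Alarm"
  else
    pvLabels.getD best ""

-- ===== PRECONDITION & SPEC =====
def Spec_determine_message_type_py (common_fields : List (String × String)) (sample_message : List (String × String)) (out : String) : Prop := out = determine_message_type_py_alt common_fields sample_message
instance (common_fields : List (String × String)) (sample_message : List (String × String)) (out : String) : Decidable (Spec_determine_message_type_py common_fields sample_message out) := by unfold Spec_determine_message_type_py; infer_instance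

-- ===== CLAIM (what is proved, stated in full; the proofs are below) =====
def Claim_equal_determine_message_type_py : Prop := ∀ (common_fields : List (String × String)) (sample_message : List (String × String)), Dom_determine_message_type_py common_fields sample_message → Spec_determine_message_type_py common_fields sample_message (determine_message_type_py common_fields sample_message)

-- ===== LEMMAS AND PROOFS =====
-- The priority rank determined by four boolean category tests.
def rankOf (a b c d : Bool) : Nat := if a then 0 else if b then 1 else if c then 2 else if d then 3 else 4

-- min of two ranks is the rank of the pointwise disjunction of the tests.
theorem min_rankOf : ∀ (a1 a2 a3 a4 b1 b2 b3 b4 : Bool),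
    Nat.min (rankOf a1 a2 a3 a4) (rankOf b1 b2 b3 b4) = rankOf (a1 || b1) (a2 || b2) (a3 || b3) (a4 || b4) := by
  decide

-- The min-reduction of B's per-key ranks equals the rank formed from A's four any()-scans.
theorem foldr_min_rank (cf : List (String × String)) :
    (cf.map (fun kv => pvRank kv.1)).foldr Nat.min 4 =
      rankOf (cf.any (fun kv => PySem.Str.isIn "alarm" (PySem.Str.lower kv.1)))
             (cf.any (fun kv => PySem.Str.isIn "temperature" (PySem.Str.lower kv.1) || PySem.Str.isIn "humidity" (PySem.Str.lower kv.1)))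
             (cf.any (fun kv => PySem.Str.isIn "battery" (PySem.Str.lower kv.1)))
             (cf.any (fun kv => PySem.Str.isIn "gateway" (PySem.Str.lower kv.1))) := by
  induction cf with
  | nil => rfl
  | cons x xs ih =>
    simp only [List.map_cons, List.foldr_cons, ih, List.any_cons]
    rw [show pvRank x.1 = rankOf (PySem.Str.isIn "alarm" (PySem.Str.lower x.1))
          (PySem.Str.isIn "temperature" (PySem.Str.lower x.1) || PySem.Str.isIn "humidity" (PySem.Str.lower x.1))
          (PySem.Str.isIn "battery" (PySem.Str.lower x.1))
          (PySem.Str.isIn "gateway" (PySem.Str.lower x.1)) from rfl]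
    exact min_rankOf _ _ _ _ _ _ _ _

-- any() of a constant condition over a nonempty iterable is that condition.
theorem any_const_of_ne_nil {α : Type} (l : List α) (h : l ≠ []) (c : Bool) :
    l.any (fun _ => c) = c := by
  cases l with
  | nil => exact absurd rfl h
  | cons x xs => cases c <;> simp

-- ===== VERDICT (by name: the statement is the Claim_ definition above) =====
theorem determine_message_type_py_spec : Claim_equal_determine_message_type_py := by
  intro cf sm _
  unfold Spec_determine_message_type_py determine_message_type_py determine_message_type_py_alt
  rw [foldr_min_rank]
  cases hA : cf.any (fun field => PySem.Str.isIn "alarm" (PySem.Str.lower field.1)) with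
  | true =>
    have hne : cf ≠ [] := by intro h; subst h; simp at hA
    rw [any_const_of_ne_nil cf hne]
    cases hp : PySem.Str.isIn "panic" (PySem.Str.lower (pyStrDict sm)) <;> simp [rankOf, pvLabels]
  | false =>
    cases hS : cf.any (fun kv => PySem.Str.isIn "temperature" (PySem.Str.lower kv.1) || PySem.Str.isIn "humidity" (PySem.Str.lower kv.1)) <;>
    cases hB : cf.any (fun kv => PySem.Str.isIn "battery" (PySem.Str.lower kv.1)) <;>
    cases hG : cf.any (fun kv => PySem.Str.isIn "gateway" (PySem.Str.lower kv.1)) <;>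
    simp [rankOf, pvLabels]
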